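-- pv_equiv track=rewrite | github.com/haomingkoo/trader-koo | trader_koo/features/candle_patterns.py | _talib_name_to_slug
-- ===== SOURCE A (Python) =====
-- def _talib_name_to_slug(name: str) -> str:
--     core = name.replace("CDL", "").lower()
--     mapping = {
--         "3whitesoldiers": "three_white_soldiers",
--         "3blackcrows": "three_black_crows",
--         "3inside": "three_inside",
--         "3outside": "three_outside",
--         "3linestrike": "three_line_strike",
--         "abandonedbaby": "abandoned_baby",
--         "engulfing": "engulfing",
--     }
--     if core in mapping:
--         return mapping[core]
--     # insert underscores between alpha blocks and digits minimally
--     out = []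
--     for i, ch in enumerate(core):
--         if i > 0 and ch.isdigit() and core[i - 1].isalpha():
--             out.append("_")
--         if i > 0 and ch.isalpha() and core[i - 1].isdigit():
--             out.append("_")
--         out.append(ch)
--     return "".join(out)
-- ===== SOURCE B (Python) =====
-- def _talib_name_to_slug(name: str) -> str:
--     core = name.replace("CDL", "").lower()
--     mapping = {
--         "3whitesoldiers": "three_white_soldiers",
--         "3blackcrows": "three_black_crows",
--         "3inside": "three_inside",
--         "3outside": "three_outside",
--         "3linestrike": "three_line_strike",
--         "abandonedbaby": "abandoned_baby",
--         "engulfing": "engulfing",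
--     }
--     if core in mapping:
--         return mapping[core]
--
--     def cat(c):
--         return 0 if c.isalpha() else (1 if c.isdigit() else 2)
--
--     def sep(a, b):
--         return (a == 0 and b == 1) or (a == 1 and b == 0)
--
--     # split core into maximal runs of same-category characters
--     runs = []
--     rest = core
--     while rest:
--         k = cat(rest[0])
--         n = 1
--         while n < len(rest) and cat(rest[n]) == k:
--             n += 1
--         runs.append((k, rest[:n]))
--         rest = rest[n:]
--     # join runs, inserting '_' exactly at alpha|digit run boundaries
--     out = ""
--     prev = None
--     for k, r in runs:
--         if prev is not None and sep(prev, k):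
--             out += "_"
--         out += r
--         prev = k
--     return out
-- ===== Notes on version B (the rewrite author's own statement) =====
-- stated objective: alternative
-- what changed: B keeps the core computation and the dict fast-path but replaces A's per-character boundary loop (which re-indexes the previous character at every position) by splitting core into maximal same-category (alpha/digit/other) runs and joining the runs with an underscore exactly at alpha|digit run boundaries.
import Mathlib
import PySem

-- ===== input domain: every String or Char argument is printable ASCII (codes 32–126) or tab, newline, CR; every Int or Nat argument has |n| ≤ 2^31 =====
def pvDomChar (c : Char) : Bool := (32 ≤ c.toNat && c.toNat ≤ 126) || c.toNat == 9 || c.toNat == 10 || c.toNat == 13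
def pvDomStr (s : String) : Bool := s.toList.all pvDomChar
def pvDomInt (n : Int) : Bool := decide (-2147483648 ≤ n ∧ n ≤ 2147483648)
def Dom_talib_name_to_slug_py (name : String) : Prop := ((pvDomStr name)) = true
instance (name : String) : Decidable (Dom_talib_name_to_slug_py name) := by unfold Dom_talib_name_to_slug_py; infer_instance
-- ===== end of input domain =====

-- B replaces A's per-character boundary loop by grouping `core` into maximal
-- same-category (alpha/digit/other) runs and joining the runs with '_' exactly at
-- alpha|digit run boundaries (objective: alternative run-based decomposition, not faster).

-- ===== PORT A =====
def pvMapA : PySem.Dict String String := PySem.Dict.ofList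
  [("3whitesoldiers", "three_white_soldiers"),
   ("3blackcrows", "three_black_crows"),
   ("3inside", "three_inside"),
   ("3outside", "three_outside"),
   ("3linestrike", "three_line_strike"),
   ("abandonedbaby", "abandoned_baby"),
   ("engulfing", "engulfing")]

-- the body of A's `for i, ch in enumerate(core)` loop
def pvStepA (core : List Char) (out : List Char) (p : Int × Char) : List Char :=
  let i := p.1
  let ch := p.2
  let out := if decide (0 < i) && PySem.Chars.isdigit ch
                && PySem.Chars.isalpha (PySem.List.pyGetD core (i - 1) ch)
             then out ++ ['_'] else out
  let out := if decide (0 < i) && PySem.Chars.isalpha ch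
                && PySem.Chars.isdigit (PySem.List.pyGetD core (i - 1) ch)
             then out ++ ['_'] else out
  out ++ [ch]

def talib_name_to_slug_py (name : String) : String :=
  let core := PySem.Str.lower (PySem.Str.replace name "CDL" "")
  match pvMapA.get? core with
  | some v => v
  | none => String.ofList ((PySem.List.enumerate core.toList 0).foldl (pvStepA core.toList) [])

-- ===== PORT B =====
-- category of a character: 0 = alpha, 1 = digit, 2 = other
def pvCat (c : Char) : Nat :=
  if PySem.Chars.isalpha c then 0 else if PySem.Chars.isdigit c then 1 else 2

-- should a '_' separate runs of categories a and b?
def pvSep (a b : Nat) : Bool := (a == 0 && b == 1) || (a == 1 && b == 0)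

-- split into maximal runs of same-category characters (Source B's while loop)
def pvRuns : List Char → List (Nat × List Char)
  | [] => []
  | c :: cs =>
      (pvCat c, c :: cs.takeWhile (fun x => pvCat x == pvCat c)) ::
        pvRuns (cs.dropWhile (fun x => pvCat x == pvCat c))
  termination_by cs => cs.length
  decreasing_by simpa using Nat.lt_succ_of_le (List.length_dropWhile_le _ _)

-- the body of Source B's `for k, r in runs` joining loop
def pvJstep (st : List Char × Option Nat) (kr : Nat × List Char) : List Char × Option Nat :=
  let out := st.1
  let out := if (match st.2 with | some p => pvSep p kr.1 | none => false)
             then out ++ ['_'] else out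
  (out ++ kr.2, some kr.1)

def talib_name_to_slug_py_alt (name : String) : String :=
  let core := PySem.Str.lower (PySem.Str.replace name "CDL" "")
  match pvMapA.get? core with
  | some v => v
  | none => String.ofList (((pvRuns core.toList).foldl pvJstep ([], none)).1)

-- ===== PRECONDITION & SPEC =====
def Spec_talib_name_to_slug_py (name : String) (out : String) : Prop := out = talib_name_to_slug_py_alt name
instance (name : String) (out : String) : Decidable (Spec_talib_name_to_slug_py name out) := by unfold Spec_talib_name_to_slug_py; infer_instance

-- ===== CLAIM (what is proved, stated in full; the proofs are below) =====
def Claim_equal_talib_name_to_slug_py : Prop := ∀ (name : String), Dom_talib_name_to_slug_py name → Spec_talib_name_to_slug_py name (talib_name_to_slug_py name)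

-- ===== LEMMAS AND PROOFS =====

-- common reference recursion: result of the slug loop after a previous character p
def pvG (p : Char) : List Char → List Char
  | [] => []
  | c :: cs => (if pvSep (pvCat p) (pvCat c) then ['_', c] else [c]) ++ pvG c cs

lemma pv_alpha_not_digit (c : Char) (h : PySem.Chars.isalpha c = true) :
    PySem.Chars.isdigit c = false := by
  simp [PySem.Chars.isalpha, PySem.Chars.isdigit, PySem.Chars.isupper, PySem.Chars.islower,
    Char.le_def, UInt32.le_iff_toNat_le] at *
  omega

-- A's pair of boundary tests equals B's run-separator test on categories
lemma pv_sep_iff (p c : Char) :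
    pvSep (pvCat p) (pvCat c)
      = ((PySem.Chars.isdigit c && PySem.Chars.isalpha p)
          || (PySem.Chars.isalpha c && PySem.Chars.isdigit p)) := by
  unfold pvCat pvSep
  cases hap : PySem.Chars.isalpha p <;> cases hac : PySem.Chars.isalpha c <;>
    cases hdp : PySem.Chars.isdigit p <;> cases hdc : PySem.Chars.isdigit c <;>
      simp_all [pv_alpha_not_digit]

lemma pvSep_self (k : Nat) : pvSep k k = false := by
  simp [pvSep]; omega

lemma pvStepA_zero (core acc : List Char) (c : Char) :
    pvStepA core acc (0, c) = acc ++ [c] := by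
  simp [pvStepA]

lemma pvStepA_pos (pre rest acc : List Char) (p c : Char) :
    pvStepA (pre ++ p :: rest) acc (((pre.length + 1 : Nat) : Int), c)
      = acc ++ (if pvSep (pvCat p) (pvCat c) then ['_'] else []) ++ [c] := by
  have hidx : ((pre.length + 1 : Nat) : Int) - 1 = ((pre.length : Nat) : Int) := by push_cast; ring
  have hget : PySem.List.pyGetD (pre ++ p :: rest) ((pre.length : Nat) : Int) c = p := by
    simp [PySem.List.pyGetD_natCast, List.getD]
  rw [pv_sep_iff]
  cases hdc : PySem.Chars.isdigit c with
  | true =>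
      cases hac : PySem.Chars.isalpha c with
      | true => exact absurd hdc (by simp [pv_alpha_not_digit c hac])
      | false => cases hap : PySem.Chars.isalpha p <;> simp [pvStepA, hget, hdc, hac, hap]
  | false =>
      cases hac : PySem.Chars.isalpha c with
      | true => cases hdp : PySem.Chars.isdigit p <;> simp [pvStepA, hget, hdc, hac, hdp]
      | false => simp [pvStepA, hget, hdc, hac]

-- A's enumerate loop, after a nonempty prefix ending in p, computes pvG p
lemma pv_loopA_aux (rest : List Char) : ∀ (pre acc : List Char) (p : Char),
    (PySem.List.enumerate rest ((pre.length + 1 : Nat) : Int)).foldl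
        (pvStepA (pre ++ p :: rest)) acc
      = acc ++ pvG p rest := by
  induction rest with
  | nil => intro pre acc p; simp [PySem.List.enumerate_nil, pvG]
  | cons c rest ih =>
      intro pre acc p
      rw [PySem.List.enumerate_cons, List.foldl_cons, pvStepA_pos pre (c :: rest) acc p c]
      have hcast : ((pre.length + 1 : Nat) : Int) + 1 = (((pre ++ [p]).length + 1 : Nat) : Int) := by
        simp
      have hlist : pre ++ p :: c :: rest = (pre ++ [p]) ++ c :: rest := by simp
      rw [hcast, hlist, ih (pre ++ [p]) _ c]
      cases h : pvSep (pvCat p) (pvCat c) <;> simp [pvG, h]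

lemma pv_loopA (cs : List Char) :
    (PySem.List.enumerate cs 0).foldl (pvStepA cs) []
      = match cs with | [] => [] | c :: cs' => c :: pvG c cs' := by
  cases cs with
  | nil => simp [PySem.List.enumerate_nil]
  | cons c cs' =>
      rw [PySem.List.enumerate_cons, List.foldl_cons, pvStepA_zero]
      have h0 : (0 : Int) + 1 = ((([] : List Char).length + 1 : Nat) : Int) := by simp
      have hl : c :: cs' = ([] : List Char) ++ c :: cs' := rfl
      rw [h0]
      conv_lhs => rw [show pvStepA (c :: cs') = pvStepA (([] : List Char) ++ c :: cs') from rfl]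
      rw [pv_loopA_aux cs' [] ([] ++ [c]) c]
      simp

lemma pv_g_congr (p q : Char) (cs : List Char) (h : pvCat p = pvCat q) :
    pvG p cs = pvG q cs := by
  cases cs <;> simp [pvG, h]

lemma pv_g_run (run : List Char) : ∀ (p : Char) (rest : List Char),
    (∀ x ∈ run, pvCat x = pvCat p) → pvG p (run ++ rest) = run ++ pvG p rest := by
  induction run with
  | nil => intro p rest _; rfl
  | cons x run ih =>
      intro p rest hall
      have hx : pvCat x = pvCat p := hall x (by simp)
      have hrun : ∀ y ∈ run, pvCat y = pvCat x := by
        intro y hy; rw [hx]; exact hall y (by simp [hy])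
      simp only [List.cons_append, pvG, hx, pvSep_self, if_neg Bool.false_ne_true]
      rw [ih x rest hrun, pv_g_congr x p rest hx]
      simp

lemma pv_joinB_aux (n : Nat) : ∀ (cs : List Char), cs.length ≤ n →
    ∀ (p : Char) (acc : List Char),
      ((pvRuns cs).foldl pvJstep (acc, some (pvCat p))).1 = acc ++ pvG p cs := by
  induction n with
  | zero =>
      intro cs hlen p acc
      have : cs = [] := List.length_eq_zero_iff.mp (Nat.le_zero.mp hlen)
      subst this; simp [pvRuns, pvG]
  | succ n ih =>
      intro cs hlen p acc
      cases cs with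
      | nil => simp [pvRuns, pvG]
      | cons c cs' =>
          rw [pvRuns, List.foldl_cons]
          have hdec : (cs'.dropWhile (fun x => pvCat x == pvCat c)).length ≤ n := by
            have := List.length_dropWhile_le (fun x => pvCat x == pvCat c) cs'
            simp at hlen; omega
          rw [show pvJstep (acc, some (pvCat p)) (pvCat c, c :: cs'.takeWhile (fun x => pvCat x == pvCat c))
                = ((if pvSep (pvCat p) (pvCat c) then acc ++ ['_'] else acc)
                    ++ (c :: cs'.takeWhile (fun x => pvCat x == pvCat c)), some (pvCat c)) from rfl]
          rw [ih _ hdec c _]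
          have hsplit : cs' = cs'.takeWhile (fun x => pvCat x == pvCat c)
              ++ cs'.dropWhile (fun x => pvCat x == pvCat c) :=
            (List.takeWhile_append_dropWhile).symm
          have hruncat : ∀ x ∈ cs'.takeWhile (fun x => pvCat x == pvCat c), pvCat x = pvCat c := by
            intro x hx
            simpa using List.mem_takeWhile_imp hx
          conv_rhs => rw [show pvG p (c :: cs') = (if pvSep (pvCat p) (pvCat c) then ['_', c] else [c]) ++ pvG c cs' from rfl, hsplit]
          rw [pv_g_run _ c _ hruncat]
          cases h : pvSep (pvCat p) (pvCat c) <;> simp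

lemma pv_joinB (cs : List Char) :
    ((pvRuns cs).foldl pvJstep ([], none)).1
      = match cs with | [] => [] | c :: cs' => c :: pvG c cs' := by
  cases cs with
  | nil => simp [pvRuns]
  | cons c cs' =>
      show ((pvRuns (c :: cs')).foldl pvJstep ([], none)).1 = c :: pvG c cs'
      rw [pvRuns, List.foldl_cons]
      rw [show pvJstep (([] : List Char), (none : Option Nat))
            (pvCat c, c :: cs'.takeWhile (fun x => pvCat x == pvCat c))
          = (c :: cs'.takeWhile (fun x => pvCat x == pvCat c), some (pvCat c)) from rfl]
      have hdec : (cs'.dropWhile (fun x => pvCat x == pvCat c)).length ≤ cs'.length :=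
        List.length_dropWhile_le _ _
      rw [pv_joinB_aux cs'.length (cs'.dropWhile (fun x => pvCat x == pvCat c)) hdec c
            (c :: cs'.takeWhile (fun x => pvCat x == pvCat c))]
      have hsplit : cs' = cs'.takeWhile (fun x => pvCat x == pvCat c)
          ++ cs'.dropWhile (fun x => pvCat x == pvCat c) :=
        (List.takeWhile_append_dropWhile).symm
      have hruncat : ∀ x ∈ cs'.takeWhile (fun x => pvCat x == pvCat c), pvCat x = pvCat c := by
        intro x hx
        simpa using List.mem_takeWhile_imp hx
      conv_rhs => rw [hsplit]
      rw [pv_g_run _ c _ hruncat]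
      simp

-- ===== VERDICT (by name: the statement is the Claim_ definition above) =====
set_option maxHeartbeats 1000000 in
theorem talib_name_to_slug_py_spec : Claim_equal_talib_name_to_slug_py := by
  intro name _
  show talib_name_to_slug_py name = talib_name_to_slug_py_alt name
  simp only [talib_name_to_slug_py, talib_name_to_slug_py_alt]
  cases h : pvMapA.get? (PySem.Str.lower (PySem.Str.replace name "CDL" "")) with
  | some v => rfl
  | none => simp only [pv_loopA, pv_joinB]
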